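-- pv_equiv track=rewrite | github.com/lp24/FP | PHond/P1Hondfinal.py | get_maior
-- ===== SOURCE A (Python) =====
-- def get_maior(Hond, nr_votos):
--        maior=Hond[0]
--        i=0
--        size=len(Hond)
--        for j in range(size):
--               if Hond[j] == maior:
--                      #no caso de haver duas entradas iguais na lista Hond, vai usar o maior que tem menor numero total de votos
--                      if nr_votos[j] < nr_votos[i]:
--                             i = j
--               if Hond[j] > maior:
--                      maior = Hond[j]
--                      i = j
--        return i
-- ===== SOURCE B (Python) =====
-- def get_maior(Hond, nr_votos):
--     # pass 1: the maximum Hondt value (empty Hond raises IndexError, like the original)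
--     maior = Hond[0]
--     for x in Hond:
--         if x > maior:
--             maior = x
--     # pass 2: among indices holding the maximum, keep the earliest one with fewest votes
--     best = None
--     for j in range(len(Hond)):
--         if Hond[j] == maior and (best is None or nr_votos[j] < nr_votos[best]):
--             best = j
--     return best
-- ===== Notes on version B (the rewrite author's own statement) =====
-- stated objective: simpler
-- what changed: Replaces the single fold that threads a (running-max, best-index) pair through interleaved equality/greater branches by two plain passes: first compute the maximum, then scan once for the earliest maximum position with strictly fewest votes.
import Mathlib
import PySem

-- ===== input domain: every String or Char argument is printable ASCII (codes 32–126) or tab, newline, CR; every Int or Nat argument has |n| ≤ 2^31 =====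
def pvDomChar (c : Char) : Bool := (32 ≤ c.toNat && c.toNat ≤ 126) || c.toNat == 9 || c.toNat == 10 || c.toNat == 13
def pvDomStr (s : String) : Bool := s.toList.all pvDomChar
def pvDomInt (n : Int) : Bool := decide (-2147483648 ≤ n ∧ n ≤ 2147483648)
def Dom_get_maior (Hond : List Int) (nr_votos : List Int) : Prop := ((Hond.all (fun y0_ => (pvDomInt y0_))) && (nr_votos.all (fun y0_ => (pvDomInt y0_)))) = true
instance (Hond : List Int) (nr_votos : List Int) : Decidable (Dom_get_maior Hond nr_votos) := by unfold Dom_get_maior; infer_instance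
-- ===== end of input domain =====

-- B replaces A's single interleaved-branch fold by two plain passes (max, then best index); objective: simpler.

-- ===== PORT A =====
-- loop body of A's single pass: state (maior, i), index j (pyGetD exact: Pre_ keeps every access in range)
def pvStepA (Hond nr_votos : List Int) (s : Int × Int) (j : Int) : Int × Int :=
  let s1 := if PySem.List.pyGetD Hond j 0 == s.1 then
      (if PySem.List.pyGetD nr_votos j 0 < PySem.List.pyGetD nr_votos s.2 0 then (s.1, j) else s)
    else s
  if PySem.List.pyGetD Hond j 0 > s1.1 then (PySem.List.pyGetD Hond j 0, j) else s1

def get_maior (Hond : List Int) (nr_votos : List Int) : Int :=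
  let maior := PySem.List.pyGetD Hond 0 0         -- Hond[0]; empty Hond (IndexError) is outside Pre_
  let size : Int := Hond.length
  ((PySem.List.pyRange 0 size 1).foldl (pvStepA Hond nr_votos) (maior, 0)).2

-- ===== PORT B =====
-- 'best is None or nr_votos[j] < nr_votos[best]'
def pvBetter (nr_votos : List Int) (j : Int) (b : Option Int) : Bool :=
  match b with
  | none => true
  | some i => PySem.List.pyGetD nr_votos j 0 < PySem.List.pyGetD nr_votos i 0

-- loop body of B's second pass
def pvStepB (Hond nr_votos : List Int) (maior : Int) (b : Option Int) (j : Int) : Option Int :=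
  if PySem.List.pyGetD Hond j 0 == maior && pvBetter nr_votos j b then some j else b

def get_maior_alt (Hond : List Int) (nr_votos : List Int) : Int :=
  let maior := Hond.foldl (fun m x => if x > m then x else m) (PySem.List.pyGetD Hond 0 0)
  let best := (PySem.List.pyRange 0 (Hond.length : Int) 1).foldl (pvStepB Hond nr_votos maior) none
  best.getD 0   -- best = some _ whenever Hond ≠ [] (guaranteed by Pre_)

-- ===== PRECONDITION & SPEC =====
-- Pre_ excludes exactly the inputs on which A raises IndexError: empty Hond, or nr_votos lacking an
-- index A reads (index 0, the positions where Hond equals the running maximum so far, and the argmax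
-- positions whose vote count is compared there).
def Pre_get_maior (Hond : List Int) (nr_votos : List Int) : Prop :=
  Hond ≠ [] ∧
  ∀ j : Nat, j < Hond.length →
    ((j = 0 ∨ ((∀ k : Nat, k < j → Hond.getD k 0 ≤ Hond.getD j 0) ∧
               ∃ k : Nat, k < j ∧ Hond.getD j 0 ≤ Hond.getD k 0)) ∨
     ((∀ k : Nat, k < j → Hond.getD k 0 < Hond.getD j 0) ∧
      ∃ l : Nat, l < Hond.length ∧ j < l ∧ Hond.getD l 0 = Hond.getD j 0 ∧
        ∀ k : Nat, k < l → j < k → Hond.getD k 0 ≤ Hond.getD j 0)) →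
    j < nr_votos.length
instance (Hond : List Int) (nr_votos : List Int) : Decidable (Pre_get_maior Hond nr_votos) := by
  unfold Pre_get_maior; infer_instance
def pvWitness_get_maior : List Int × List Int := ([1, 2, 1], [3, 1, 2])

def Spec_get_maior (Hond : List Int) (nr_votos : List Int) (out : Int) : Prop := out = get_maior_alt Hond nr_votos
instance (Hond : List Int) (nr_votos : List Int) (out : Int) : Decidable (Spec_get_maior Hond nr_votos out) := by unfold Spec_get_maior; infer_instance

-- ===== CLAIM (what is proved, stated in full; the proofs are below) =====
def Claim_equal_get_maior : Prop := ∀ (Hond : List Int) (nr_votos : List Int), Dom_get_maior Hond nr_votos → Pre_get_maior Hond nr_votos → Spec_get_maior Hond nr_votos (get_maior Hond nr_votos)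

-- ===== LEMMAS AND PROOFS =====

-- A's fold over the first n indices
def pvAfold (H V : List Int) (n : Nat) : Int × Int :=
  (PySem.List.pyRange 0 (n : Int) 1).foldl (pvStepA H V) (PySem.List.pyGetD H 0 0, 0)

-- B's second-pass fold over the first n indices, with target m
def pvBfold (H V : List Int) (m : Int) (n : Nat) : Option Int :=
  (PySem.List.pyRange 0 (n : Int) 1).foldl (pvStepB H V m) none

lemma pvRange_succ (n : Nat) :
    PySem.List.pyRange 0 ((n : Int) + 1) 1 = PySem.List.pyRange 0 (n : Int) 1 ++ [(n : Int)] := by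
  simpa using PySem.List.pyRange_one_succ_right (a := 0) (b := (n : Int)) (by positivity)

lemma pvAfold_succ (H V : List Int) (n : Nat) :
    pvAfold H V (n + 1) = pvStepA H V (pvAfold H V n) (n : Int) := by
  unfold pvAfold
  rw [show ((n + 1 : Nat) : Int) = (n : Int) + 1 by push_cast; ring, pvRange_succ, List.foldl_append]
  rfl

lemma pvBfold_succ (H V : List Int) (m : Int) (n : Nat) :
    pvBfold H V m (n + 1) = pvStepB H V m (pvBfold H V m n) (n : Int) := by
  unfold pvBfold
  rw [show ((n + 1 : Nat) : Int) = (n : Int) + 1 by push_cast; ring, pvRange_succ, List.foldl_append]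
  rfl

lemma pvBfold_none (H V : List Int) (m : Int) (n : Nat)
    (h : ∀ j : Nat, j < n → H[j]?.getD 0 ≠ m) : pvBfold H V m n = none := by
  induction n with
  | zero => simp [pvBfold]
  | succ k ih =>
      rw [pvBfold_succ, ih (fun j hj => h j (Nat.lt_succ_of_lt hj))]
      simp [pvStepB, h k (Nat.lt_succ_self k)]

-- main invariant: after n ≥ 1 steps, A's maior bounds the prefix and B's scan for that maior finds A's i
lemma pv_invariant (H V : List Int) (n : Nat) (hn : 1 ≤ n) :
    (∀ j : Nat, j < n → H[j]?.getD 0 ≤ (pvAfold H V n).1) ∧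
    pvBfold H V (pvAfold H V n).1 n = some (pvAfold H V n).2 := by
  induction n with
  | zero => omega
  | succ k ih =>
      rcases Nat.eq_or_lt_of_le hn with h1 | h1
      · -- base case n = 1
        have hk : k = 0 := by omega
        subst hk
        have hr : PySem.List.pyRange 0 1 1 = [0] := by
          simpa using PySem.List.pyRange_one_singleton (a := (0 : Int))
        constructor
        · intro j hj
          interval_cases j
          simp [pvAfold, pvStepA, hr, PySem.List.pyGetD_zero, List.getD_eq_getElem?_getD]
        · simp [pvAfold, pvBfold, pvStepA, pvStepB, pvBetter, hr]
      · have hk1 : 1 ≤ k := by omega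
        obtain ⟨hbound, hbest⟩ := ih hk1
        set m := (pvAfold H V k).1 with hm
        set i := (pvAfold H V k).2 with hi
        have hsA : pvAfold H V k = (m, i) := rfl
        have hgd : PySem.List.pyGetD H (k : Int) 0 = H[k]?.getD 0 := by
          simp [PySem.List.pyGetD_natCast, List.getD_eq_getElem?_getD]
        have hgv : PySem.List.pyGetD V (k : Int) 0 = V[k]?.getD 0 := by
          simp [PySem.List.pyGetD_natCast, List.getD_eq_getElem?_getD]
        rcases lt_trichotomy (H[k]?.getD 0) m with hc | hc | hc
        · -- H[k] < m : state unchanged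
          have hA : pvAfold H V (k + 1) = (m, i) := by
            rw [pvAfold_succ, hsA]
            simp [pvStepA, hgd, hc.ne, not_lt_of_gt hc]
          rw [hA]
          constructor
          · intro j hj
            rcases Nat.lt_succ_iff_lt_or_eq.mp hj with h | h
            · exact hbound j h
            · subst h; exact le_of_lt hc
          · rw [pvBfold_succ, hbest]
            simp [pvStepB, hgd, hc.ne]
        · -- H[k] = m : votes tie-break
          by_cases hv : V[k]?.getD 0 < PySem.List.pyGetD V i 0
          · have hA : pvAfold H V (k + 1) = (m, (k : Int)) := by
              rw [pvAfold_succ, hsA]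
              simp [pvStepA, hgd, hgv, hc, hv]
            rw [hA]
            constructor
            · intro j hj
              rcases Nat.lt_succ_iff_lt_or_eq.mp hj with h | h
              · exact hbound j h
              · subst h; exact le_of_eq hc
            · rw [pvBfold_succ, hbest]
              simp [pvStepB, pvBetter, hgd, hgv, hc, hv]
          · have hA : pvAfold H V (k + 1) = (m, i) := by
              rw [pvAfold_succ, hsA]
              simp [pvStepA, hgd, hgv, hc, hv]
            rw [hA]
            constructor
            · intro j hj
              rcases Nat.lt_succ_iff_lt_or_eq.mp hj with h | h
              · exact hbound j h
              · subst h; exact le_of_eq hc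
            · rw [pvBfold_succ, hbest]
              simp [pvStepB, pvBetter, hgd, hgv, hc, hv]
        · -- m < H[k] : new maximum at k
          have hA : pvAfold H V (k + 1) = (H[k]?.getD 0, (k : Int)) := by
            rw [pvAfold_succ, hsA]
            simp [pvStepA, hgd, hc.ne', hc]
          rw [hA]
          constructor
          · intro j hj
            rcases Nat.lt_succ_iff_lt_or_eq.mp hj with h | h
            · exact le_of_lt (lt_of_le_of_lt (hbound j h) hc)
            · subst h; exact le_rfl
          · have hnone : pvBfold H V (H[k]?.getD 0) k = none :=
              pvBfold_none H V _ k (fun j hj => ne_of_lt (lt_of_le_of_lt (hbound j hj) hc))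
            rw [pvBfold_succ, hnone]
            simp [pvStepB, pvBetter, hgd]

-- the first component of A's fold is the plain running maximum
lemma pvAfold_fst (H V : List Int) (l : List Int) (s : Int × Int) :
    (l.foldl (pvStepA H V) s).1 =
      l.foldl (fun m j => if PySem.List.pyGetD H j 0 > m then PySem.List.pyGetD H j 0 else m) s.1 := by
  induction l generalizing s with
  | nil => rfl
  | cons x t ih =>
      rw [List.foldl_cons, List.foldl_cons, ih]
      congr 1
      by_cases h1 : PySem.List.pyGetD H x 0 == s.1 <;>
        by_cases h2 : PySem.List.pyGetD V x 0 < PySem.List.pyGetD V s.2 0 <;>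
          simp [pvStepA, h1, h2] <;> split <;> rfl

-- ===== VERDICT (by name: the statement is the Claim_ definition above) =====
theorem get_maior_spec : Claim_equal_get_maior := by
  intro Hond nr_votos _ hpre
  obtain ⟨hne, _⟩ := hpre
  have hlen : 1 ≤ Hond.length := List.length_pos_iff.mpr hne
  obtain ⟨hbound, hbest⟩ := pv_invariant Hond nr_votos Hond.length hlen
  have hmax : Hond.foldl (fun m x => if x > m then x else m) (PySem.List.pyGetD Hond 0 0)
      = (pvAfold Hond nr_votos Hond.length).1 := by
    rw [pvAfold, pvAfold_fst]
    exact (PySem.List.foldl_pyRange_zero_pyGetD' Hond 0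
      (fun m x => if x > m then x else m) (PySem.List.pyGetD Hond 0 0)).symm
  show get_maior Hond nr_votos = get_maior_alt Hond nr_votos
  have hA : get_maior Hond nr_votos = (pvAfold Hond nr_votos Hond.length).2 := rfl
  have hB : get_maior_alt Hond nr_votos =
      (pvBfold Hond nr_votos
        (Hond.foldl (fun m x => if x > m then x else m) (PySem.List.pyGetD Hond 0 0))
        Hond.length).getD 0 := rfl
  rw [hA, hB, hmax, hbest]
  rfl
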